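-- pv_equiv track=rewrite | github.com/nikoxp/OmniBox-Spider | 影视/采集/低端影视.py | build_numbered_share_line_names
-- ===== SOURCE A (Python) =====
-- def safe_text(value):
--     return str(value or "").strip()
--
-- def infer_drive_type(url: str) -> str:
--     raw = safe_text(url).lower()
--     if "pan.baidu.com" in raw or "baidu" in raw:
--         return "baidu"
--     if "pan.quark.cn" in raw or "quark" in raw:
--         return "quark"
--     if "drive.uc.cn" in raw or raw == "uc":
--         return "uc"
--     if "cloud.189.cn" in raw or "tianyi" in raw:
--         return "tianyi"
--     if "aliyundrive" in raw or "alipan" in raw or "aliyun" in raw or "ali" in raw: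
--         return "ali"
--     if "pan.xunlei.com" in raw or "xunlei" in raw:
--         return "xunlei"
--     if "115.com" in raw:
--         return "115"
--     if "123pan" in raw or "123684" in raw or "123865" in raw or "123912" in raw:
--         return "123pan"
--     return "netdisk"
--
-- def drive_display_name(drive_type: str) -> str:
--     mapping = {
--         "baidu": "百度",
--         "quark": "夸克",
--         "uc": "UC",
--         "tianyi": "天翼",
--         "ali": "阿里",
--         "xunlei": "迅雷",
--         "115": "115",
--         "123pan": "123",
--         "netdisk": "网盘",
--     }
--     return mapping.get(drive_type, "网盘")
--
-- def build_numbered_share_line_names(share_urls):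
--     counters = {}
--     totals = {}
--     typed = []
--     for share_url in share_urls:
--         drive_type = infer_drive_type(share_url)
--         typed.append((share_url, drive_type))
--         totals[drive_type] = totals.get(drive_type, 0) + 1
--
--     result = {}
--     for share_url, drive_type in typed:
--         counters[drive_type] = counters.get(drive_type, 0) + 1
--         base_name = drive_display_name(drive_type)
--         if totals.get(drive_type, 0) > 1:
--             result[share_url] = f"{base_name}{counters[drive_type]}"
--         else:
--             result[share_url] = base_name
--     return result
-- ===== SOURCE B (Python) =====
-- def safe_text(value):
--     return str(value or "").strip()
--
-- def infer_drive_type(url: str) -> str: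
--     raw = safe_text(url).lower()
--     if "pan.baidu.com" in raw or "baidu" in raw:
--         return "baidu"
--     if "pan.quark.cn" in raw or "quark" in raw:
--         return "quark"
--     if "drive.uc.cn" in raw or raw == "uc":
--         return "uc"
--     if "cloud.189.cn" in raw or "tianyi" in raw:
--         return "tianyi"
--     if "aliyundrive" in raw or "alipan" in raw or "aliyun" in raw or "ali" in raw:
--         return "ali"
--     if "pan.xunlei.com" in raw or "xunlei" in raw:
--         return "xunlei"
--     if "115.com" in raw:
--         return "115"
--     if "123pan" in raw or "123684" in raw or "123865" in raw or "123912" in raw: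
--         return "123pan"
--     return "netdisk"
--
-- def drive_display_name(drive_type: str) -> str:
--     mapping = {
--         "baidu": "百度",
--         "quark": "夸克",
--         "uc": "UC",
--         "tianyi": "天翼",
--         "ali": "阿里",
--         "xunlei": "迅雷",
--         "115": "115",
--         "123pan": "123",
--         "netdisk": "网盘",
--     }
--     return mapping.get(drive_type, "网盘")
--
-- def build_numbered_share_line_names(share_urls):
--     # Group-then-number: bucket the URLs by drive type, precompute each group's
--     # whole name sequence from its size (reversed, so it can be consumed with
--     # O(1) pop()), then hand the names out in input order by popping each
--     # group's stack (no running counter/total dicts).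
--     groups = {}
--     for u in share_urls:
--         groups.setdefault(infer_drive_type(u), []).append(u)
--     pending = {}
--     for t, urls in groups.items():
--         base = drive_display_name(t)
--         names = [base] if len(urls) == 1 else [f"{base}{k}" for k in range(1, len(urls) + 1)]
--         pending[t] = names[::-1]
--     result = {}
--     for u in share_urls:
--         result[u] = pending[infer_drive_type(u)].pop()
--     return result
-- ===== Notes on version B (the rewrite author's own statement) =====
-- stated objective: alternative
-- what changed: B replaces A's running counter/total dicts with a group-then-number strategy: one pass buckets the URLs by drive type, each group's whole name sequence is precomputed from its size (reversed into a stack), and a final pass hands the names out in input order by popping each group's stack.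
import Mathlib
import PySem

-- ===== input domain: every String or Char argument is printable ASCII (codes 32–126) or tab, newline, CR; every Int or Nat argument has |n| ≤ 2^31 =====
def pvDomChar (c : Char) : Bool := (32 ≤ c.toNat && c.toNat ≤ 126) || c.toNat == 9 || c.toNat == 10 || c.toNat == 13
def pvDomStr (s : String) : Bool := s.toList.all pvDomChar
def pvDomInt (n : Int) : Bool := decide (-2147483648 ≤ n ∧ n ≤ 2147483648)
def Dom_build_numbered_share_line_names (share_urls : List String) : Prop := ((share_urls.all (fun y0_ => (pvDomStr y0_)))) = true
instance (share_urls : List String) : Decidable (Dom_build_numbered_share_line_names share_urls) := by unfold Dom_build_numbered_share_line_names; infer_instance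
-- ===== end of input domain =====

-- B replaces A's running counter/total dicts by group-then-number: it buckets the URLs by
-- drive type, precomputes each group's whole name sequence from its size (reversed into a
-- stack), and hands the names out in input order by popping each group's stack.

-- ===== PORT A =====
-- shared module helpers (used verbatim by both Pythons)
def safe_text (value : String) : String :=
  PySem.Str.strip (if value == "" then "" else value)

def infer_drive_type (url : String) : String :=
  let raw := PySem.Str.lower (safe_text url)
  if PySem.Str.isIn "pan.baidu.com" raw || PySem.Str.isIn "baidu" raw then "baidu"
  else if PySem.Str.isIn "pan.quark.cn" raw || PySem.Str.isIn "quark" raw then "quark"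
  else if PySem.Str.isIn "drive.uc.cn" raw || raw == "uc" then "uc"
  else if PySem.Str.isIn "cloud.189.cn" raw || PySem.Str.isIn "tianyi" raw then "tianyi"
  else if PySem.Str.isIn "aliyundrive" raw || PySem.Str.isIn "alipan" raw || PySem.Str.isIn "aliyun" raw || PySem.Str.isIn "ali" raw then "ali"
  else if PySem.Str.isIn "pan.xunlei.com" raw || PySem.Str.isIn "xunlei" raw then "xunlei"
  else if PySem.Str.isIn "115.com" raw then "115"
  else if PySem.Str.isIn "123pan" raw || PySem.Str.isIn "123684" raw || PySem.Str.isIn "123865" raw || PySem.Str.isIn "123912" raw then "123pan"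
  else "netdisk"

def drive_display_name (drive_type : String) : String :=
  (PySem.Dict.ofList [("baidu", "百度"), ("quark", "夸克"), ("uc", "UC"),
    ("tianyi", "天翼"), ("ali", "阿里"), ("xunlei", "迅雷"), ("115", "115"),
    ("123pan", "123"), ("netdisk", "网盘")]).getD drive_type "网盘"

def build_numbered_share_line_names (share_urls : List String) : List (String × String) :=
  let st1 := share_urls.foldl
    (fun (st : List (String × String) × PySem.Dict String Int) share_url =>
      let drive_type := infer_drive_type share_url
      (st.1 ++ [(share_url, drive_type)], st.2.modify drive_type 0 (· + 1)))
    ([], PySem.Dict.empty)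
  let typed := st1.1
  let totals := st1.2
  let st2 := typed.foldl
    (fun (st : PySem.Dict String Int × PySem.Dict String String) p =>
      let counters := st.1.modify p.2 0 (· + 1)
      let base_name := drive_display_name p.2
      if totals.getD p.2 0 > 1 then
        (counters, st.2.insert p.1 (base_name ++ PySem.Int.toStr (counters.getD p.2 0)))
      else
        (counters, st.2.insert p.1 base_name))
    (PySem.Dict.empty, PySem.Dict.empty)
  st2.2.items

-- ===== PORT B =====
def build_numbered_share_line_names_alt (share_urls : List String) : List (String × String) :=
  let groups := share_urls.foldl
    (fun (g : PySem.Dict String (List String)) u =>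
      g.modify (infer_drive_type u) [] (· ++ [u]))
    PySem.Dict.empty
  let pending := groups.items.foldl
    (fun (p : PySem.Dict String (List String)) q =>
      let base := drive_display_name q.1
      let names := if PySem.List.len q.2 == 1 then [base]
        else (PySem.List.pyRange 1 (PySem.List.len q.2 + 1) 1).map
          (fun k => base ++ PySem.Int.toStr k)
      p.insert q.1 ((PySem.List.slice? names none none (-1)).getD []))
    PySem.Dict.empty
  -- pending[t].pop() = last element + list without it; the KeyError/IndexError
  -- cases are unreachable (t is always a key, its stack is never empty), so the
  -- total forms getD/pyGetD/dropLast are exact here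
  let st := share_urls.foldl
    (fun (st : PySem.Dict String (List String) × PySem.Dict String String) u =>
      let t := infer_drive_type u
      let q := st.1.getD t []
      (st.1.insert t q.dropLast,
       st.2.insert u (PySem.List.pyGetD q (-1) "")))
    (pending, PySem.Dict.empty)
  st.2.items

-- ===== PRECONDITION & SPEC =====
def Spec_build_numbered_share_line_names (share_urls : List String) (out : List (String × String)) : Prop := out = build_numbered_share_line_names_alt share_urls
instance (share_urls : List String) (out : List (String × String)) : Decidable (Spec_build_numbered_share_line_names share_urls out) := by unfold Spec_build_numbered_share_line_names; infer_instance

-- ===== CLAIM (what is proved, stated in full; the proofs are below) =====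
def Claim_equal_build_numbered_share_line_names : Prop := ∀ (share_urls : List String), Dom_build_numbered_share_line_names share_urls → Spec_build_numbered_share_line_names share_urls (build_numbered_share_line_names share_urls)

-- ===== LEMMAS AND PROOFS =====

-- the name sequence B precomputes for one group (same expression as in the port's fold)
def pvNames (t : String) (urls : List String) : List String :=
  if PySem.List.len urls == 1 then [drive_display_name t]
  else (PySem.List.pyRange 1 (PySem.List.len urls + 1) 1).map
    (fun k => drive_display_name t ++ PySem.Int.toStr k)

-- shape of A's first pass: typed list and totals dict
lemma pv_pass1 (xs : List String) (acc : List (String × String)) (d : PySem.Dict String Int) :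
    xs.foldl
      (fun (st : List (String × String) × PySem.Dict String Int) share_url =>
        let drive_type := infer_drive_type share_url
        (st.1 ++ [(share_url, drive_type)], st.2.modify drive_type 0 (· + 1)))
      (acc, d)
    = (acc ++ xs.map (fun u => (u, infer_drive_type u)),
       (xs.map infer_drive_type).foldl (fun d t => d.modify t 0 (· + 1)) d) := by
  induction xs generalizing acc d with
  | nil => simp
  | cons u rest ih => simp [List.foldl_cons, ih]

-- B's grouping pass: groups[t] is the sublist of URLs of type t
lemma pv_groups (xs : List String) (t : String) :
    (xs.foldl (fun (g : PySem.Dict String (List String)) u =>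
        g.modify (infer_drive_type u) [] (· ++ [u])) PySem.Dict.empty).getD t []
    = xs.filter (fun u => infer_drive_type u == t) := by
  have h : xs.foldl (fun (g : PySem.Dict String (List String)) u =>
        g.modify (infer_drive_type u) [] (· ++ [u])) PySem.Dict.empty
      = (xs.map (fun u => (infer_drive_type u, u))).foldl
          (fun (g : PySem.Dict String (List String)) p =>
            g.modify p.1 [] (· ++ [p.2])) PySem.Dict.empty := by
    rw [List.foldl_map]
  rw [h, PySem.Dict.getD_foldl_modify_append]
  simp [PySem.Dict.getD_empty, List.filter_map, Function.comp_def]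

-- number of URLs of type t = count of t among the inferred types
lemma pv_filter_length (xs : List String) (t : String) :
    (xs.filter (fun u => infer_drive_type u == t)).length
    = (xs.map infer_drive_type).count t := by
  rw [List.count_eq_countP, List.countP_map, ← List.countP_eq_length_filter]
  rfl

-- the stack B pops at count c: nonempty, its top, and what remains
lemma pv_names_drop_ne (t : String) (G : List String) (c : Nat) (hc : c < G.length) :
    (pvNames t G).drop c ≠ [] := by
  unfold pvNames
  intro hnil
  rw [List.drop_eq_nil_iff] at hnil
  by_cases h1 : G.length = 1
  · rw [if_pos (by simp [PySem.List.len_eq, h1])] at hnil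
    simp at hnil
    omega
  · rw [if_neg (by simp [PySem.List.len_eq]; omega)] at hnil
    rw [List.length_map, PySem.List.length_pyRange_one] at hnil
    rw [PySem.List.len_eq] at hnil
    omega

set_option maxHeartbeats 1000000 in
lemma pv_names_head (t : String) (G : List String) (c : Nat) (hc : c < G.length) :
    PySem.List.pyGetD ((pvNames t G).drop c) 0 ""
    = (if 1 < G.length then drive_display_name t ++ PySem.Int.toStr ((c : Int) + 1)
       else drive_display_name t) := by
  unfold pvNames
  rw [PySem.List.pyGetD_zero]
  by_cases h1 : G.length = 1
  · have hc0 : c = 0 := by omega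
    rw [if_pos (by simp [PySem.List.len_eq, h1]), if_neg (by omega), hc0]
    simp
  · have hlt : 1 < G.length := by omega
    rw [if_neg (by simp [PySem.List.len_eq]; omega), if_pos hlt]
    have hdg : ∀ (l : List String) (i : Nat), (l.drop i).getD 0 "" = l.getD i "" := by
      intro l i
      simp [List.getD, List.getElem?_drop]
    rw [hdg]
    rw [← PySem.List.pyGetD_natCast (xs := (PySem.List.pyRange 1 (PySem.List.len G + 1) 1).map
      (fun k => drive_display_name t ++ PySem.Int.toStr k)) (n := c) (d := "")]
    rw [PySem.List.pyGetD_map_pyRange_one _ _ _ _ _ (by simp [PySem.List.len_eq]; omega)]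
    rw [add_comm 1 (c : Int)]

set_option maxHeartbeats 1000000 in
lemma pv_names_head_rev (t : String) (G : List String) (c : Nat) (hc : c < G.length) :
    PySem.List.pyGetD (((pvNames t G).drop c).reverse) (-1) ""
    = (if 1 < G.length then drive_display_name t ++ PySem.Int.toStr ((c : Int) + 1)
       else drive_display_name t) := by
  have hne := pv_names_drop_ne t G c hc
  rw [PySem.List.pyGetD_neg_one _ _ (by simpa using hne), List.getLast_reverse,
    List.head_eq_getElem]
  have h2 := pv_names_head t G c hc
  rw [PySem.List.pyGetD_zero,
    List.getD_eq_getElem _ _ (by rw [List.length_pos_iff]; exact hne)] at h2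
  exact h2

lemma pv_names_pop (t : String) (G : List String) (c : Nat) :
    (((pvNames t G).drop c).reverse).dropLast = ((pvNames t G).drop (c + 1)).reverse := by
  rw [List.dropLast_reverse, List.tail_drop]

-- count of the inferred type over a one-longer prefix (used by the invariants)
lemma pv_count_map_snoc_self (done : List String) (u : String) :
    ((done ++ [u]).map infer_drive_type).count (infer_drive_type u)
    = (done.map infer_drive_type).count (infer_drive_type u) + 1 := by
  simp [List.count_append]

lemma pv_count_map_snoc_ne (done : List String) (u : String) (t' : String)
    (h : t' ≠ infer_drive_type u) :
    ((done ++ [u]).map infer_drive_type).count t' = (done.map infer_drive_type).count t' := by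
  simp only [List.map_append, List.count_append, List.map_cons, List.map_nil]
  have h0 : List.count t' [infer_drive_type u] = 0 := List.count_eq_zero.mpr (by simp [h])
  omega

-- coupling induction: A's numbering pass and B's queue-consuming pass build the same result dict
set_option maxHeartbeats 1000000 in
lemma pv_main (xs : List String) (totals : PySem.Dict String Int)
    (htot : ∀ t, totals.getD t 0 = ((xs.map infer_drive_type).count t : Int)) :
    ∀ (rest done : List String) (counters : PySem.Dict String Int)
      (pending : PySem.Dict String (List String)) (r : PySem.Dict String String),
      xs = done ++ rest →
      (∀ t, counters.getD t 0 = ((done.map infer_drive_type).count t : Int)) →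
      (∀ t, t ∈ rest.map infer_drive_type →
        pending.getD t [] = ((pvNames t (xs.filter (fun v => infer_drive_type v == t))).drop
          ((done.map infer_drive_type).count t)).reverse) →
      ((rest.map (fun u => (u, infer_drive_type u))).foldl
        (fun (st : PySem.Dict String Int × PySem.Dict String String) p =>
          if totals.getD p.2 0 > 1 then
            (st.1.modify p.2 0 (· + 1), st.2.insert p.1 (drive_display_name p.2
              ++ PySem.Int.toStr ((st.1.modify p.2 0 (· + 1)).getD p.2 0)))
          else
            (st.1.modify p.2 0 (· + 1), st.2.insert p.1 (drive_display_name p.2)))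
        (counters, r)).2
      = (rest.foldl
          (fun (st : PySem.Dict String (List String) × PySem.Dict String String) u =>
            (st.1.insert (infer_drive_type u) (st.1.getD (infer_drive_type u) []).dropLast,
             st.2.insert u (PySem.List.pyGetD (st.1.getD (infer_drive_type u) []) (-1) "")))
          (pending, r)).2 := by
  intro rest
  induction rest with
  | nil => intro done counters pending r _ _ _; rfl
  | cons u rest' ih =>
    intro done counters pending r hxs hc hp
    have hcount : (done.map infer_drive_type).count (infer_drive_type u)
        < (xs.filter (fun v => infer_drive_type v == infer_drive_type u)).length := by
      rw [pv_filter_length, hxs, List.map_append, List.count_append]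
      have h1 : 0 < ((u :: rest').map infer_drive_type).count (infer_drive_type u) :=
        List.count_pos_iff.mpr (List.mem_map_of_mem (List.mem_cons_self))
      omega
    have hq : pending.getD (infer_drive_type u) []
        = ((pvNames (infer_drive_type u)
            (xs.filter (fun v => infer_drive_type v == infer_drive_type u))).drop
          ((done.map infer_drive_type).count (infer_drive_type u))).reverse :=
      hp _ (List.mem_map_of_mem (List.mem_cons_self))
    have hcnt : (counters.modify (infer_drive_type u) 0 (· + 1)).getD (infer_drive_type u) 0
        = (((done.map infer_drive_type).count (infer_drive_type u) : Int)) + 1 := by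
      rw [PySem.Dict.getD_modify_self, hc]
    have hxs' : xs = (done ++ [u]) ++ rest' := by rw [hxs, List.append_assoc]; rfl
    have hinv1 : ∀ t', (counters.modify (infer_drive_type u) 0 (· + 1)).getD t' 0
        = (((done ++ [u]).map infer_drive_type).count t' : Int) := by
      intro t'
      by_cases h : t' = infer_drive_type u
      · rw [h, hcnt, pv_count_map_snoc_self]
        omega
      · rw [PySem.Dict.getD_modify_of_ne _ _ _ h, hc, pv_count_map_snoc_ne _ _ _ h]
    have hinv2 : ∀ t', t' ∈ rest'.map infer_drive_type →
        (pending.insert (infer_drive_type u)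
          ((((pvNames (infer_drive_type u)
            (xs.filter (fun v => infer_drive_type v == infer_drive_type u))).drop
              ((done.map infer_drive_type).count (infer_drive_type u))).reverse).dropLast)).getD t' []
        = ((pvNames t' (xs.filter (fun v => infer_drive_type v == t'))).drop
            (((done ++ [u]).map infer_drive_type).count t')).reverse := by
      intro t' ht'
      by_cases h : t' = infer_drive_type u
      · rw [h, PySem.Dict.getD_insert_self, pv_names_pop, pv_count_map_snoc_self]
      · rw [PySem.Dict.getD_insert_of_ne _ _ _ h,
          hp t' (by rw [List.map_cons]; exact List.mem_cons_of_mem _ ht'),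
          pv_count_map_snoc_ne _ _ _ h]
    rw [List.map_cons, List.foldl_cons, List.foldl_cons]
    dsimp only
    generalize hgen : infer_drive_type u = tu
    rw [hgen] at hq hcnt hcount hinv1 hinv2
    by_cases hT : totals.getD tu 0 > 1
    · have hT' : 1 < (xs.filter (fun v => infer_drive_type v == tu)).length := by
        rw [htot] at hT
        rw [pv_filter_length]
        exact_mod_cast hT
      rw [if_pos hT, hcnt, hq, pv_names_head_rev _ _ _ hcount, if_pos hT']
      exact ih (done ++ [u]) _ _ _ hxs' hinv1 hinv2
    · have hT' : ¬ 1 < (xs.filter (fun v => infer_drive_type v == tu)).length := by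
        rw [htot] at hT
        rw [pv_filter_length]
        intro hcon
        exact hT (by exact_mod_cast hcon)
      rw [if_neg hT, hq, pv_names_head_rev _ _ _ hcount, if_neg hT']
      exact ih (done ++ [u]) _ _ _ hxs' hinv1 hinv2

-- B's pending dict after its second pass, read at any occurring type
set_option maxHeartbeats 1000000 in
lemma pv_pending (xs : List String) (t : String) (ht : t ∈ xs.map infer_drive_type) :
    ((xs.foldl (fun (g : PySem.Dict String (List String)) u =>
        g.modify (infer_drive_type u) [] (· ++ [u])) PySem.Dict.empty).items.foldl
      (fun (p : PySem.Dict String (List String)) q =>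
        p.insert q.1 ((PySem.List.slice? (if PySem.List.len q.2 == 1 then [drive_display_name q.1]
          else (PySem.List.pyRange 1 (PySem.List.len q.2 + 1) 1).map
            (fun k => drive_display_name q.1 ++ PySem.Int.toStr k)) none none (-1)).getD []))
      PySem.Dict.empty).getD t []
    = (pvNames t (xs.filter (fun u => infer_drive_type u == t))).reverse := by
  have hfn : (fun (p : PySem.Dict String (List String)) (q : String × List String) =>
        p.insert q.1 ((PySem.List.slice? (if PySem.List.len q.2 == 1 then [drive_display_name q.1]
          else (PySem.List.pyRange 1 (PySem.List.len q.2 + 1) 1).map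
            (fun k => drive_display_name q.1 ++ PySem.Int.toStr k)) none none (-1)).getD []))
      = (fun (p : PySem.Dict String (List String)) (q : String × List String) =>
        p.insert q.1 ((pvNames q.1 q.2).reverse)) := by
    funext p q
    rw [PySem.List.slice?_none_none_neg_one]
    rfl
  rw [hfn]
  set groups := xs.foldl (fun (g : PySem.Dict String (List String)) u =>
      g.modify (infer_drive_type u) [] (· ++ [u])) PySem.Dict.empty with hgroups
  have hnodup : groups.keys.Nodup := by
    rw [hgroups]
    exact PySem.Dict.nodup_keys_foldl_modify_key xs infer_drive_type []
      (fun _ u => (· ++ [u])) PySem.Dict.empty PySem.Dict.nodup_keys_empty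
  have hkeys : t ∈ groups.keys := by
    rw [hgroups, PySem.Dict.keys_foldl_modify_key]
    simp only [PySem.Dict.keys_empty, PySem.Set.update_nil_left]
    rw [PySem.Set.mem_ofList]
    exact ht
  have hGf : groups.getD t [] = xs.filter (fun u => infer_drive_type u == t) := by
    rw [hgroups]; exact pv_groups xs t
  -- the fold building pending is a fresh-key insert loop over groups.items
  have hfold : (groups.items.foldl
      (fun (p : PySem.Dict String (List String)) (q : String × List String) =>
        p.insert q.1 ((pvNames q.1 q.2).reverse))
      PySem.Dict.empty).items
      = groups.items.map (fun q => (q.1, (pvNames q.1 q.2).reverse)) := by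
    have h := PySem.Dict.items_foldl_insert_fresh (l := groups.items) (k := Prod.fst)
      (v := fun q => (pvNames q.1 q.2).reverse) (d := PySem.Dict.empty)
      (by intro a _; simp [PySem.Dict.contains_empty])
      (by simp only [PySem.Dict.keys] at hnodup; exact hnodup)
    simpa using h
  obtain ⟨v, hv⟩ : ∃ v, groups.get? t = some v := by
    rcases hcg : groups.get? t with _ | v
    · exact absurd hkeys ((PySem.Dict.get?_eq_none_iff_not_mem_keys (d := groups) (k := t)).mp hcg)
    · exact ⟨v, rfl⟩
  have hvG : v = xs.filter (fun u => infer_drive_type u == t) := by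
    rw [← hGf, PySem.Dict.getD_eq_get?_getD, hv]
    rfl
  have hmem : (t, v) ∈ groups.items := PySem.Dict.mem_items_of_get?_eq_some groups hv
  have hget : (groups.items.foldl
      (fun (p : PySem.Dict String (List String)) (q : String × List String) =>
        p.insert q.1 ((pvNames q.1 q.2).reverse))
      PySem.Dict.empty).get? t = some ((pvNames t v).reverse) := by
    apply PySem.Dict.get?_of_mem_items
    · rw [hfold]; exact List.mem_map_of_mem hmem
    · simp only [PySem.Dict.keys, hfold, List.map_map]
      simp only [PySem.Dict.keys] at hnodup
      simpa [Function.comp_def] using hnodup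
  rw [PySem.Dict.getD_eq_get?_getD, hget, hvG]
  rfl

-- ===== VERDICT (by name: the statement is the Claim_ definition above) =====
set_option maxHeartbeats 1000000 in
theorem build_numbered_share_line_names_spec : Claim_equal_build_numbered_share_line_names := by
  intro share_urls _
  unfold Spec_build_numbered_share_line_names build_numbered_share_line_names build_numbered_share_line_names_alt
  simp only []
  rw [pv_pass1]
  simp only []
  congr 1
  have htot : ∀ t,
      ((share_urls.map infer_drive_type).foldl (fun d t => d.modify t 0 (· + 1)) PySem.Dict.empty).getD t 0
      = ((share_urls.map infer_drive_type).count t : Int) := by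
    intro t
    rw [PySem.Dict.getD_foldl_modify_add_one]
    simp [PySem.Dict.getD_empty]
  exact pv_main share_urls _ htot share_urls [] PySem.Dict.empty _ PySem.Dict.empty
    (by simp)
    (by intro t; simp [PySem.Dict.getD_empty])
    (by intro t ht; simpa using pv_pending share_urls t ht)
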